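-- pv_equiv track=rewrite | github.com/VUB-HYDR/2022_Vanderkelen_etal_GMD | preprocessing/utils_irrigtopo.py | get_nhrus_per_res
-- ===== SOURCE A (Python) =====
-- def get_res_dependency(pfaf_reservoirs, seg_dependency_dict):
--
--     """Get list of segments dependend per reservoir
--     input:  1. list with pfaf codes of reservoirs,
--             2. dictionary with per segment dependend reservoirs
--             3. dictionary with weights per segment dependend reservoir
--     output: res_dependency_dict[pfaf_res] = [pfaf_to_sum]
--     dictionary with first level keys: reservoir pfafs
--                             values: contributing river segments pfafs
--                             """
--
--
--     # dictionary to store dependency per reservoir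
--     res_dependency_dict = {}
--
--     for pfaf_res in pfaf_reservoirs:
--
--         pfafs_to_sum = []    # initialise list of segments to sum by
--         for pfaf_seg, lookup_pfaf_res in seg_dependency_dict.items():
--
--             if pfaf_res in lookup_pfaf_res:
--                 pfafs_to_sum.append(pfaf_seg)
--
--         # save dependend segments per reservoir in dict
--         res_dependency_dict[pfaf_res] = pfafs_to_sum
--     return res_dependency_dict
--
-- def get_nhrus_per_res(pfaf_reservoirs, seg_dependency_dict):
--     """Calculcate number of segments per reservoir
--         output: dictionary with keys: reservoir pfaf, value: number of segments dependend on it"""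
--
--     # get hrus per reservoir ordered
--     res_dependency_dict = get_res_dependency(pfaf_reservoirs, seg_dependency_dict)
--
--     nseg_res_dict = {}
--     nseg_res = []
--     for pfaf_res in pfaf_reservoirs:
--
--         nseg_res.append(len(res_dependency_dict[pfaf_res]))
--         nseg_res_dict[pfaf_res] = len(res_dependency_dict[pfaf_res])
--
--     return  nseg_res_dict
-- ===== SOURCE B (Python) =====
-- def get_nhrus_per_res(pfaf_reservoirs, seg_dependency_dict):
--     """Calculate number of segments per reservoir.
--     Single pass over the segments: each segment increments the counter of every
--     reservoir (deduplicated per segment) it depends on, instead of re-scanning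
--     all segments once per reservoir."""
--     counts = {pfaf_res: 0 for pfaf_res in pfaf_reservoirs}
--     for lookup_pfaf_res in seg_dependency_dict.values():
--         for pfaf_res in set(lookup_pfaf_res):
--             if pfaf_res in counts:
--                 counts[pfaf_res] += 1
--     return counts
-- ===== Notes on version B (the rewrite author's own statement) =====
-- stated objective: faster
-- what changed: Instead of re-scanning every segment's dependency list once per reservoir (and materialising the list of dependent segments just to take its length), B makes a single pass over the segments, incrementing a per-reservoir counter for each (deduplicated) reservoir a segment depends on.
import Mathlib
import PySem

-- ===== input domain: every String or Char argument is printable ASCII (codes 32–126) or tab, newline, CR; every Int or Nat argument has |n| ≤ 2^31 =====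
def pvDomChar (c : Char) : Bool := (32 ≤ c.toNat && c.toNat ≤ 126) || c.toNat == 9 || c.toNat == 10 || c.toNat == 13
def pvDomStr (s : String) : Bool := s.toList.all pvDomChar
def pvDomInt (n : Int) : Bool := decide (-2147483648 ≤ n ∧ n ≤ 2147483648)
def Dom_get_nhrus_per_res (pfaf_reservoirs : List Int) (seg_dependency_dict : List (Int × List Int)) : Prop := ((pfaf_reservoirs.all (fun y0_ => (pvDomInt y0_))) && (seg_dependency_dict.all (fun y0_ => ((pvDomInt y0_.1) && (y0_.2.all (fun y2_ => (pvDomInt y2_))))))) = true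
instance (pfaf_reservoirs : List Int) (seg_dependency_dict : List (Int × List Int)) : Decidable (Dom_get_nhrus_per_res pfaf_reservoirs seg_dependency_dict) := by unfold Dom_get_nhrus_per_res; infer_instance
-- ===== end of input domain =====

-- B replaces A's per-reservoir re-scan of all segments by one pass over the segments
-- that increments per-reservoir counters (objective: faster).

-- ===== PORT A =====
def get_res_dependency (pfaf_reservoirs : List Int) (seg_dependency_dict : List (Int × List Int)) : PySem.Dict Int (List Int) :=
  pfaf_reservoirs.foldl
    (fun res_dependency_dict pfaf_res =>
      let pfafs_to_sum := seg_dependency_dict.foldl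
        (fun pfafs_to_sum p =>
          if pfaf_res ∈ p.2 then pfafs_to_sum ++ [p.1] else pfafs_to_sum) []
      res_dependency_dict.insert pfaf_res pfafs_to_sum)
    PySem.Dict.empty

def get_nhrus_per_res (pfaf_reservoirs : List Int) (seg_dependency_dict : List (Int × List Int)) : List (Int × Int) :=
  let res_dependency_dict := get_res_dependency pfaf_reservoirs seg_dependency_dict
  -- state = (nseg_res, nseg_res_dict); res_dependency_dict[pfaf_res] always exists
  -- (same key list), so getD with default [] is exact (no KeyError is reachable).
  let st := pfaf_reservoirs.foldl
    (fun (st : List Int × PySem.Dict Int Int) pfaf_res =>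
      let n : Int := (res_dependency_dict.getD pfaf_res []).length
      (st.1 ++ [n], st.2.insert pfaf_res n))
    ([], PySem.Dict.empty)
  st.2.items

-- ===== PORT B =====
def get_nhrus_per_res_alt (pfaf_reservoirs : List Int) (seg_dependency_dict : List (Int × List Int)) : List (Int × Int) :=
  let counts0 : PySem.Dict Int Int :=
    pfaf_reservoirs.foldl (fun counts pfaf_res => counts.insert pfaf_res 0) PySem.Dict.empty
  -- iterating the Python set only increments counters of a dict looked up afterwards,
  -- so the result is independent of the set's iteration order
  let counts := seg_dependency_dict.foldl
    (fun counts p =>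
      (PySem.Set.ofList p.2).foldl
        (fun counts r => if counts.contains r then counts.modify r 0 (· + 1) else counts)
        counts)
    counts0
  counts.items

-- ===== PRECONDITION & SPEC =====
def Spec_get_nhrus_per_res (pfaf_reservoirs : List Int) (seg_dependency_dict : List (Int × List Int)) (out : List (Int × Int)) : Prop := out = get_nhrus_per_res_alt pfaf_reservoirs seg_dependency_dict
instance (pfaf_reservoirs : List Int) (seg_dependency_dict : List (Int × List Int)) (out : List (Int × Int)) : Decidable (Spec_get_nhrus_per_res pfaf_reservoirs seg_dependency_dict out) := by unfold Spec_get_nhrus_per_res; infer_instance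

-- ===== CLAIM (what is proved, stated in full; the proofs are below) =====
def Claim_equal_get_nhrus_per_res : Prop := ∀ (pfaf_reservoirs : List Int) (seg_dependency_dict : List (Int × List Int)), Dom_get_nhrus_per_res pfaf_reservoirs seg_dependency_dict → Spec_get_nhrus_per_res pfaf_reservoirs seg_dependency_dict (get_nhrus_per_res pfaf_reservoirs seg_dependency_dict)

-- ===== LEMMAS AND PROOFS =====

-- items of a nodup-keyed dict are its keys paired with their getD values
theorem pv_items_eq_keys_map (d : PySem.Dict Int Int) (h : d.keys.Nodup) :
    d.items = d.keys.map (fun k => (k, d.getD k 0)) := by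
  conv_lhs => rw [show d.items = d.items.map id from (List.map_id d.items).symm]
  simp only [PySem.Dict.keys, List.map_map]
  refine List.map_congr_left (fun p hp => ?_)
  have := PySem.Dict.getD_of_mem_items d (k := p.1) (v := p.2) (by simpa using hp) h 0
  simp [Function.comp, this]

-- A-side: getD of a fold of inserts whose value depends only on the key
theorem pv_getD_foldl_insert_not_mem {V : Type} (f : Int → V) (v0 : V) (rs : List Int)
    (d0 : PySem.Dict Int V) (k : Int) (h : k ∉ rs) :
    (rs.foldl (fun d r => d.insert r (f r)) d0).getD k v0 = d0.getD k v0 := by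
  induction rs generalizing d0 with
  | nil => rfl
  | cons r rest ih =>
    simp only [List.foldl_cons]
    rw [ih _ (by simp at h; exact h.2), PySem.Dict.getD_insert_of_ne _ _ _ (by simp at h; exact h.1)]

theorem pv_getD_foldl_insert_mem {V : Type} (f : Int → V) (v0 : V) (rs : List Int)
    (d0 : PySem.Dict Int V) (k : Int) (h : k ∈ rs) :
    (rs.foldl (fun d r => d.insert r (f r)) d0).getD k v0 = f k := by
  induction rs generalizing d0 with
  | nil => simp at h
  | cons r rest ih =>
    simp only [List.foldl_cons]
    by_cases hk : k ∈ rest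
    · exact ih _ hk
    · have hkr : k = r := by
        rcases List.mem_cons.mp h with h' | h'
        · exact h'
        · exact absurd h' hk
      subst hkr
      rw [pv_getD_foldl_insert_not_mem f v0 rest _ k hk, PySem.Dict.getD_insert_self]

-- the pair-state fold of A projects to a plain dict fold
theorem pv_snd_pair_fold (g : Int → Int) (rs : List Int) (l0 : List Int) (d0 : PySem.Dict Int Int) :
    (rs.foldl (fun (st : List Int × PySem.Dict Int Int) r => (st.1 ++ [g r], st.2.insert r (g r))) (l0, d0)).2
      = rs.foldl (fun d r => d.insert r (g r)) d0 := by
  induction rs generalizing l0 d0 with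
  | nil => rfl
  | cons r rest ih => simp only [List.foldl_cons]; exact ih _ _

-- A's inner scan counts the segments containing r
theorem pv_seg_scan_len (r : Int) (d : List (Int × List Int)) (init : List Int) :
    (d.foldl (fun l (p : Int × List Int) => if r ∈ p.2 then l ++ [p.1] else l) init).length
      = init.length + d.countP (fun p => decide (r ∈ p.2)) := by
  induction d generalizing init with
  | nil => simp
  | cons p rest ih =>
    simp only [List.foldl_cons, List.countP_cons]
    by_cases hr : r ∈ p.2
    · simp [hr, ih]; omega
    · simp [hr, ih]

-- B-side: one inner step (one segment) preserves contains …
theorem pv_inner_contains (S : List Int) (a : PySem.Dict Int Int) (k : Int) :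
    ((S.foldl (fun a r => if a.contains r then a.modify r 0 (· + 1) else a) a).contains k)
      = a.contains k := by
  induction S generalizing a with
  | nil => rfl
  | cons r rest ih =>
    simp only [List.foldl_cons]
    by_cases hc : a.contains r
    · rw [if_pos hc, ih]
      rw [PySem.Dict.contains_modify]
      by_cases hkr : k = r
      · subst hkr; simp [hc]
      · simp [hkr]
    · rw [if_neg hc, ih]

-- … preserves keys …
theorem pv_inner_keys (S : List Int) (a : PySem.Dict Int Int) :
    (S.foldl (fun a r => if a.contains r then a.modify r 0 (· + 1) else a) a).keys = a.keys := by
  induction S generalizing a with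
  | nil => rfl
  | cons r rest ih =>
    simp only [List.foldl_cons]
    by_cases hc : a.contains r
    · rw [if_pos hc, ih, PySem.Dict.keys_modify, PySem.Dict.keys_insert_of_contains _ _ hc]
    · rw [if_neg hc, ih]

-- … and adds 1 to the counter of each contained key present in the (nodup) segment set
theorem pv_inner_getD (S : List Int) (hS : S.Nodup) (a : PySem.Dict Int Int) (k : Int) :
    (S.foldl (fun a r => if a.contains r then a.modify r 0 (· + 1) else a) a).getD k 0
      = a.getD k 0 + (if k ∈ S ∧ a.contains k then 1 else 0) := by
  induction S generalizing a with
  | nil => simp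
  | cons r rest ih =>
    have hnr : r ∉ rest := (List.nodup_cons.mp hS).1
    have hrest : rest.Nodup := (List.nodup_cons.mp hS).2
    simp only [List.foldl_cons]
    by_cases hc : a.contains r
    · rw [if_pos hc, ih hrest]
      rw [PySem.Dict.getD_modify, PySem.Dict.contains_modify]
      by_cases hkr : k = r
      · subst hkr
        simp [hc, hnr]
      · simp only [hkr]
        by_cases hm : k ∈ rest <;> by_cases hck : a.contains k <;> simp [hm, hck, hkr]
    · rw [if_neg hc, ih hrest]
      by_cases hkr : k = r
      · subst hkr; simp [hc, hnr]
      · by_cases hm : k ∈ rest <;> simp [hm, hkr]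

-- the outer pass over the segments: keys are unchanged …
theorem pv_outer_keys (d : List (Int × List Int)) (acc : PySem.Dict Int Int) :
    (d.foldl (fun counts (p : Int × List Int) =>
        (PySem.Set.ofList p.2).foldl
          (fun counts r => if counts.contains r then counts.modify r 0 (· + 1) else counts) counts)
      acc).keys = acc.keys := by
  induction d generalizing acc with
  | nil => rfl
  | cons p rest ih => simp only [List.foldl_cons]; rw [ih, pv_inner_keys]

-- … and each contained counter ends at its start plus the number of segments containing it
theorem pv_outer_getD (d : List (Int × List Int)) (acc : PySem.Dict Int Int) (k : Int)
    (hc : acc.contains k = true) :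
    (d.foldl (fun counts (p : Int × List Int) =>
        (PySem.Set.ofList p.2).foldl
          (fun counts r => if counts.contains r then counts.modify r 0 (· + 1) else counts) counts)
      acc).getD k 0 = acc.getD k 0 + (d.countP (fun p => decide (k ∈ p.2)) : Int) := by
  induction d generalizing acc with
  | nil => simp
  | cons p rest ih =>
    simp only [List.foldl_cons, List.countP_cons]
    rw [ih _ (by rw [pv_inner_contains]; exact hc),
        pv_inner_getD _ (PySem.Set.nodup_ofList p.2) acc k]
    by_cases hm : k ∈ p.2
    · simp [PySem.Set.mem_ofList, hm, hc]; ring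
    · simp [PySem.Set.mem_ofList, hm]

-- keys of B's initial dict (and of A's result dict) are the deduped reservoir list
theorem pv_keys_insert_fold (f : Int → Int) (rs : List Int) :
    (rs.foldl (fun d r => d.insert r (f r)) PySem.Dict.empty).keys = PySem.Set.ofList rs := by
  rw [PySem.Dict.keys_foldl_insert rs (fun _ r => f r) PySem.Dict.empty]
  simp [PySem.Dict.keys_empty, PySem.Set.update_nil_left]

-- both sides produce (dedup rs).map (k, #segments containing k)
theorem pv_resdep_getD (rs : List Int) (d : List (Int × List Int)) (k : Int) (h : k ∈ rs) :
    (get_res_dependency rs d).getD k []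
      = d.foldl (fun l (p : Int × List Int) => if k ∈ p.2 then l ++ [p.1] else l) [] := by
  unfold get_res_dependency
  exact pv_getD_foldl_insert_mem
    (fun r => d.foldl (fun l (p : Int × List Int) => if r ∈ p.2 then l ++ [p.1] else l) [])
    [] rs PySem.Dict.empty k h

theorem pv_A_items (rs : List Int) (d : List (Int × List Int)) :
    get_nhrus_per_res rs d
      = (PySem.Set.ofList rs).map (fun k => (k, (d.countP (fun p => decide (k ∈ p.2)) : Int))) := by
  unfold get_nhrus_per_res
  simp only []
  rw [pv_snd_pair_fold (fun r => ((get_res_dependency rs d).getD r []).length) rs [] PySem.Dict.empty]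
  set f : Int → Int := fun r => ((get_res_dependency rs d).getD r []).length with hf
  have hkeys : (rs.foldl (fun dd r => dd.insert r (f r)) PySem.Dict.empty).keys = PySem.Set.ofList rs :=
    pv_keys_insert_fold f rs
  rw [pv_items_eq_keys_map _ (by rw [hkeys]; exact PySem.Set.nodup_ofList rs), hkeys]
  refine List.map_congr_left (fun k hk => ?_)
  have hkrs : k ∈ rs := (PySem.Set.mem_ofList rs k).mp hk
  rw [pv_getD_foldl_insert_mem f 0 rs PySem.Dict.empty k hkrs]
  have : f k = (d.countP (fun p => decide (k ∈ p.2)) : Int) := by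
    rw [hf]
    simp only []
    rw [pv_resdep_getD rs d k hkrs, pv_seg_scan_len]
    simp
  rw [this]

theorem pv_B_items (rs : List Int) (d : List (Int × List Int)) :
    get_nhrus_per_res_alt rs d
      = (PySem.Set.ofList rs).map (fun k => (k, (d.countP (fun p => decide (k ∈ p.2)) : Int))) := by
  unfold get_nhrus_per_res_alt
  simp only []
  have hkeys0 : (rs.foldl (fun dd r => dd.insert r (0 : Int)) PySem.Dict.empty).keys
      = PySem.Set.ofList rs := pv_keys_insert_fold (fun _ => 0) rs
  have hkeys : (d.foldl (fun counts (p : Int × List Int) =>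
        (PySem.Set.ofList p.2).foldl
          (fun counts r => if counts.contains r then counts.modify r 0 (· + 1) else counts) counts)
      (rs.foldl (fun dd r => dd.insert r (0 : Int)) PySem.Dict.empty)).keys = PySem.Set.ofList rs := by
    rw [pv_outer_keys, hkeys0]
  rw [pv_items_eq_keys_map _ (by rw [hkeys]; exact PySem.Set.nodup_ofList rs), hkeys]
  refine List.map_congr_left (fun k hk => ?_)
  have hkrs : k ∈ rs := (PySem.Set.mem_ofList rs k).mp hk
  have hc : (rs.foldl (fun dd r => dd.insert r (0 : Int)) PySem.Dict.empty).contains k = true := by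
    rw [PySem.Dict.contains_iff_mem_keys, hkeys0]; exact hk
  rw [pv_outer_getD d _ k hc, pv_getD_foldl_insert_mem (fun _ => (0 : Int)) 0 rs PySem.Dict.empty k hkrs]
  simp

-- ===== VERDICT (by name: the statement is the Claim_ definition above) =====
theorem get_nhrus_per_res_spec : Claim_equal_get_nhrus_per_res := by
  intro rs d _
  unfold Spec_get_nhrus_per_res
  rw [pv_A_items, pv_B_items]
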